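-- pv_equiv track=rewrite | github.com/arjanitalestrani1/Book-Cipher-dhe-Route-Transposition | book_cipher.py | book_cipher_encrypt
-- ===== SOURCE A (Python) =====
-- def clean_text(text):
--     return text.lower().replace("\n", " ").split()
--
-- def build_book_index(book_text):
--     words = clean_text(book_text)
--     index_map = {}
--
--     for i, word in enumerate(words, start=1):
--         if word not in index_map:
--             index_map[word] = []
--         index_map[word].append(i)
--
--     return index_map
--
-- def book_cipher_encrypt(message, book_text):
--     index_map = build_book_index(book_text)
--     message_words = clean_text(message)
--
--     encrypted = []
--
--     for word in message_words:
--         if word in index_map: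
--             encrypted.append(str(index_map[word][0]))
--         else:
--             encrypted.append("?")
--
--     return " ".join(encrypted)
-- ===== SOURCE B (Python) =====
-- def clean_text(text):
--     return text.lower().replace("\n", " ").split()
--
-- def book_cipher_encrypt(message, book_text):
--     message_words = clean_text(message)
--     remaining = set(message_words)
--     answers = {}
--     for i, word in enumerate(clean_text(book_text), start=1):
--         if not remaining:
--             break
--         if word in remaining:
--             answers[word] = i
--             remaining.remove(word)
--     return " ".join(str(answers[w]) if w in answers else "?" for w in message_words)
-- ===== Notes on version B (the rewrite author's own statement) =====
-- stated objective: alternative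
-- what changed: B never builds A's full book index of position lists: it makes one targeted pass over the book carrying the set of still-unresolved message words, records only each needed word's first position, and breaks out of the scan early as soon as every message word is resolved.
import Mathlib
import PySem

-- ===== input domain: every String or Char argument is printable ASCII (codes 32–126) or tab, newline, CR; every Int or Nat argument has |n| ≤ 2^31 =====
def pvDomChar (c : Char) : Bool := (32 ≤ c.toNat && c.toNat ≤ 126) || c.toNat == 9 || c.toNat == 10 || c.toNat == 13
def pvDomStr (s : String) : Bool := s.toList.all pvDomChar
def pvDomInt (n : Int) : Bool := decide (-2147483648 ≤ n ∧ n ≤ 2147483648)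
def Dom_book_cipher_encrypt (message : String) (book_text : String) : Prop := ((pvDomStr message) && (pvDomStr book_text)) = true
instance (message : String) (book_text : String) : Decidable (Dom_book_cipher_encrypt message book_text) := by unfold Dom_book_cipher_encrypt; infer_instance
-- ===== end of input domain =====

-- B replaces A's full book index of position lists by one targeted scan of the book that
-- carries the set of still-unresolved message words and breaks early once all are resolved.

-- ===== PORT A =====
-- clean_text (shared by both Python versions)
def pvCleanText (text : String) : List String :=
  PySem.Str.split₀ (PySem.Str.replace (PySem.Str.lower text) "\n" " ")

-- loop body of build_book_index: 'if word not in index_map: index_map[word] = []' then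
-- 'index_map[word].append(i)' (appending to the stored list in place = re-inserting it extended)
def pvStep (d : PySem.Dict String (List Int)) (p : Int × String) : PySem.Dict String (List Int) :=
  let d1 := if d.contains p.2 then d else d.insert p.2 []
  d1.insert p.2 (d1.getD p.2 [] ++ [p.1])

def pvBuildBookIndex (book_text : String) : PySem.Dict String (List Int) :=
  (PySem.List.enumerate (pvCleanText book_text) 1).foldl pvStep PySem.Dict.empty

def book_cipher_encrypt (message : String) (book_text : String) : String :=
  let index_map := pvBuildBookIndex book_text
  let message_words := pvCleanText message
  let encrypted := message_words.foldl (fun acc word =>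
    if index_map.contains word then
      -- index_map[word][0]: whenever the key is present its list is nonempty, so Python's
      -- [0] never raises; headD 0 is exact here
      acc ++ [PySem.Int.toStr ((index_map.getD word []).headD 0)]
    else
      acc ++ ["?"]) []
  PySem.Str.join " " encrypted

-- ===== PORT B =====
-- B's book loop: 'for i, word in enumerate(clean_text(book_text), 1): if not remaining: break;
-- if word in remaining: answers[word] = i; remaining.remove(word)'.
-- remaining.remove is guarded by the membership test, so it never raises: Set.discard is exact here.
def pvScan : List (Int × String) → PySem.Set String → PySem.Dict String Int → PySem.Dict String Int
  | [], _, ans => ans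
  | p :: t, rem, ans =>
      if PySem.Set.len rem = 0 then ans
      else if PySem.Set.contains rem p.2 then
        pvScan t (PySem.Set.discard rem p.2) (ans.insert p.2 p.1)
      else
        pvScan t rem ans

def book_cipher_encrypt_alt (message : String) (book_text : String) : String :=
  let message_words := pvCleanText message
  let answers := pvScan (PySem.List.enumerate (pvCleanText book_text) 1)
    (PySem.Set.ofList message_words) PySem.Dict.empty
  PySem.Str.join " " (message_words.map (fun w =>
    match answers.get? w with
    | some i => PySem.Int.toStr i
    | none => "?"))

-- ===== PRECONDITION & SPEC =====
def Spec_book_cipher_encrypt (message : String) (book_text : String) (out : String) : Prop := out = book_cipher_encrypt_alt message book_text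
instance (message : String) (book_text : String) (out : String) : Decidable (Spec_book_cipher_encrypt message book_text out) := by unfold Spec_book_cipher_encrypt; infer_instance

-- ===== CLAIM =====
def Claim_equal_book_cipher_encrypt : Prop := ∀ (message : String) (book_text : String), Dom_book_cipher_encrypt message book_text → Spec_book_cipher_encrypt message book_text (book_cipher_encrypt message book_text)

-- ===== LEMMAS AND PROOFS =====

-- ---- A side: the stored list at a key after the whole build ----

theorem pvStep_getD (d : PySem.Dict String (List Int)) (p : Int × String) (w : String) :
    (pvStep d p).getD w [] = if p.2 = w then d.getD w [] ++ [p.1] else d.getD w [] := by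
  unfold pvStep
  by_cases hc : d.contains p.2
  · simp only [hc, if_true, PySem.Dict.getD_insert]
    by_cases hw : p.2 = w
    · subst hw; simp
    · have hw' : ¬ w = p.2 := fun h => hw h.symm
      simp [hw, hw']
  · have h0 : d.getD p.2 [] = [] := PySem.Dict.getD_of_not_contains d [] (by simpa using hc)
    simp only [hc, if_false, Bool.false_eq_true, PySem.Dict.getD_insert_self,
      PySem.Dict.getD_insert]
    by_cases hw : p.2 = w
    · subst hw; simp [h0]
    · have hw' : ¬ w = p.2 := fun h => hw h.symm
      simp [hw, hw']

theorem pvStep_contains (d : PySem.Dict String (List Int)) (p : Int × String) (w : String) :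
    (pvStep d p).contains w = (w == p.2 || d.contains w) := by
  unfold pvStep
  by_cases hc : d.contains p.2
  · simp [hc, PySem.Dict.contains_insert]
  · cases h : (w == p.2) <;>
      simp [hc, PySem.Dict.contains_insert, h]

theorem pvBuild_fold_getD (l : List (Int × String)) (d : PySem.Dict String (List Int)) (w : String) :
    (l.foldl pvStep d).getD w [] = d.getD w [] ++ (l.filter (fun p => p.2 == w)).map (·.1) := by
  induction l generalizing d with
  | nil => simp
  | cons p t ih =>
      simp only [List.foldl_cons, ih, List.filter_cons]
      rw [pvStep_getD]
      by_cases hw : p.2 = w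
      · simp [hw]
      · simp [hw]

theorem pvBuild_fold_contains (l : List (Int × String)) (d : PySem.Dict String (List Int)) (w : String) :
    (l.foldl pvStep d).contains w = (d.contains w || l.any (fun p => p.2 == w)) := by
  induction l generalizing d with
  | nil => simp
  | cons p t ih =>
      simp only [List.foldl_cons, ih, pvStep_contains, List.any_cons]
      cases h : d.contains w <;> cases h2 : (w == p.2) <;>
        simp_all [BEq.comm]

-- first position stored for w = s + (first index of w in ws)
theorem pv_head_filter_enumerate (ws : List String) (s : Int) (w : String) :
    ((((PySem.List.enumerate ws s).filter (fun p => p.2 == w)).map (·.1)).head?) =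
      Option.map (fun k : Nat => s + (k : Int)) (PySem.List.index? ws w) := by
  induction ws generalizing s with
  | nil => simp [PySem.List.enumerate_nil]
  | cons x t ih =>
      rw [PySem.List.enumerate_cons]
      simp only [List.filter_cons]
      by_cases hx : x = w
      · subst hx
        rw [PySem.List.index?_cons_self]
        simp
      · have hne : (((s, x) : Int × String).2 == w) = false := by simpa using hx
        rw [PySem.List.index?_cons_of_ne _ hx]
        simp only [hne, Bool.false_eq_true, if_false, ih (s + 1)]
        cases PySem.List.index? t w with
        | none => rfl
        | some k =>
            simp only [Option.map_some, Option.map_some]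
            congr 1
            push_cast
            ring

-- a word occurs among the enumerated pairs iff it occurs in the word list
theorem pv_any_enumerate (ws : List String) (s : Int) (w : String) :
    ((PySem.List.enumerate ws s).any (fun p => p.2 == w)) = ws.any (fun x => x == w) := by
  induction ws generalizing s with
  | nil => simp [PySem.List.enumerate_nil]
  | cons x t ih => rw [PySem.List.enumerate_cons]; simp [ih]

-- A's per-word loop is an append-of-singletons fold = a map
theorem pv_loop (l : List String) (d : PySem.Dict String (List Int)) (acc : List String) :
    l.foldl (fun acc word =>
        if d.contains word then acc ++ [PySem.Int.toStr ((d.getD word []).headD 0)]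
        else acc ++ ["?"]) acc
      = acc ++ l.map (fun word =>
          if d.contains word then PySem.Int.toStr ((d.getD word []).headD 0) else "?") := by
  induction l generalizing acc with
  | nil => simp
  | cons x t ih =>
      simp only [List.foldl_cons, List.map_cons, ih]
      by_cases hc : d.contains x <;> simp [hc]

-- ---- B side: what pvScan's answers dictionary looks up to ----

-- After scanning the enumerated words, a key w that is still wanted (w ∈ rem) maps to its
-- first position; a key not wanted keeps its old binding.  Requires rem/answers disjoint at w.
theorem pvScan_get? (ws : List String) (s : Int) (rem : PySem.Set String)
    (ans : PySem.Dict String Int) (w : String)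
    (h : w ∈ rem → ans.get? w = none) :
    (pvScan (PySem.List.enumerate ws s) rem ans).get? w =
      if w ∈ rem then Option.map (fun k : Nat => s + (k : Int)) (PySem.List.index? ws w)
      else ans.get? w := by
  induction ws generalizing s rem ans with
  | nil =>
      rw [PySem.List.enumerate_nil]
      simp only [pvScan]
      by_cases hw : w ∈ rem
      · simp [hw, h hw, PySem.List.index?_eq_idxOf?]
      · simp [hw]
  | cons x t ih =>
      rw [PySem.List.enumerate_cons]
      simp only [pvScan]
      by_cases hlen : PySem.Set.len rem = 0
      · -- break: remaining is empty, so w ∉ rem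
        have hrem : rem = [] := by cases rem with
          | nil => rfl
          | cons a l => exfalso; simp [PySem.Set.len] at hlen; omega
        subst hrem
        simp
      · simp only [hlen, if_false]
        by_cases hx : PySem.Set.contains rem x
        · have hxm : x ∈ rem := (PySem.Set.contains_iff rem x).mp hx
          simp only [hx, if_true]
          have h' : w ∈ PySem.Set.discard rem x → (ans.insert x s).get? w = none := by
            intro hw
            have hw' := (PySem.Set.mem_discard rem x w).mp hw
            rw [PySem.Dict.get?_insert_of_ne ans s hw'.2, h hw'.1]
          rw [ih (s + 1) _ _ h']
          by_cases hwx : w = x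
          · subst hwx
            have : w ∉ PySem.Set.discard rem w := fun hc => ((PySem.Set.mem_discard rem w w).mp hc).2 rfl
            rw [if_neg this, PySem.Dict.get?_insert_self]
            rw [if_pos hxm, PySem.List.index?_cons_self]
            simp
          · have hmem : w ∈ PySem.Set.discard rem x ↔ w ∈ rem := by
              rw [PySem.Set.mem_discard]
              exact ⟨fun hc => hc.1, fun hc => ⟨hc, hwx⟩⟩
            rw [PySem.Dict.get?_insert_of_ne ans s hwx]
            by_cases hw : w ∈ rem
            · rw [if_pos (hmem.mpr hw), if_pos hw,
                PySem.List.index?_cons_of_ne _ (fun e => hwx e.symm)]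
              cases PySem.List.index? t w with
              | none => rfl
              | some k =>
                  simp only [Option.map_some]
                  congr 1
                  push_cast
                  ring
            · rw [if_neg (fun hc => hw (hmem.mp hc)), if_neg hw]
        · rw [if_neg hx, ih (s + 1) _ _ h]
          by_cases hw : w ∈ rem
          · have hwx : x ≠ w := fun e => (by simpa [e] using hx : w ∉ rem) hw
            rw [if_pos hw, if_pos hw, PySem.List.index?_cons_of_ne _ hwx]
            cases PySem.List.index? t w with
            | none => rfl
            | some k =>
                simp only [Option.map_some]
                congr 1
                push_cast
                ring
          · rw [if_neg hw, if_neg hw]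

-- ---- per message word, A's encoding = B's encoding ----
theorem pv_word_eq (ws : List String) (msg : List String) (w : String) (hw : w ∈ msg) :
    (if ((PySem.List.enumerate ws 1).foldl pvStep PySem.Dict.empty).contains w then
        PySem.Int.toStr ((((PySem.List.enumerate ws 1).foldl pvStep PySem.Dict.empty).getD w []).headD 0)
      else "?") =
    (match (pvScan (PySem.List.enumerate ws 1) (PySem.Set.ofList msg) PySem.Dict.empty).get? w with
      | some i => PySem.Int.toStr i
      | none => "?") := by
  have hB := pvScan_get? ws 1 (PySem.Set.ofList msg) PySem.Dict.empty w (fun _ => by simp)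
  rw [if_pos ((PySem.Set.mem_ofList msg w).mpr hw)] at hB
  rw [hB, pvBuild_fold_contains, pvBuild_fold_getD]
  simp only [PySem.Dict.contains_empty, PySem.Dict.getD_empty, Bool.false_or, List.nil_append,
    pv_any_enumerate]
  cases h : PySem.List.index? ws w with
  | none =>
      have hnm : w ∉ ws := (PySem.List.index?_eq_none_iff ws w).mp h
      have hf : ws.any (fun x => x == w) = false := by
        rw [List.any_eq_false]
        intro x hx
        simp only [beq_iff_eq]
        exact fun e => hnm (e ▸ hx)
      rw [hf]
      rfl
  | some k =>
      have hm : w ∈ ws := (PySem.List.index?_isSome_iff ws w).mp (by rw [h]; rfl)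
      have hany : ws.any (fun x => x == w) = true :=
        List.any_eq_true.mpr ⟨w, hm, by simp⟩
      have hh := pv_head_filter_enumerate ws 1 w
      rw [h] at hh
      simp only [Option.map_some] at hh
      rw [hany, if_pos rfl]
      have hd : (((PySem.List.enumerate ws 1).filter (fun p => p.2 == w)).map (·.1)).headD 0
          = 1 + (k : Int) := by
        rw [List.headD_eq_head?, hh]; rfl
      rw [hd]
      rfl

-- ===== VERDICT =====
theorem book_cipher_encrypt_spec : Claim_equal_book_cipher_encrypt := by
  intro message book_text _
  unfold Spec_book_cipher_encrypt
  simp only [book_cipher_encrypt, book_cipher_encrypt_alt, pvBuildBookIndex]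
  rw [pv_loop]
  simp only [List.nil_append]
  exact congrArg (PySem.Str.join " ")
    (List.map_congr_left (fun w hw => pv_word_eq (pvCleanText book_text) (pvCleanText message) w hw))
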